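-- pv_equiv track=rewrite | github.com/nkaijala/gource-hud-wrapper | gource_hud/stats.py | rolling_unique_count
-- ===== SOURCE A (Python) =====
-- from collections import Counter, defaultdict, deque
--
-- def rolling_unique_count(days: list[int], sets_by_day: dict[int, set[str]], window_seconds: int) -> dict[int, int]:
--     result: dict[int, int] = {}
--     queue: deque[tuple[int, set[str]]] = deque()
--     counter: Counter[str] = Counter()
--     for t in days:
--         new_set = sets_by_day[t]
--         queue.append((t, new_set))
--         for elem in new_set:
--             counter[elem] += 1
--         while queue and (t - queue[0][0]) >= window_seconds:
--             _, old_set = queue.popleft()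
--             for elem in old_set:
--                 counter[elem] -= 1
--                 if counter[elem] == 0:
--                     del counter[elem]
--         result[t] = len(counter)
--     return result
-- ===== SOURCE B (Python) =====
-- from collections import deque
--
--
-- def rolling_unique_count(days: list[int], sets_by_day: dict[int, set[str]], window_seconds: int) -> dict[int, int]:
--     result: dict[int, int] = {}
--     queue: deque[tuple[int, set[str]]] = deque()
--     for t in days:
--         queue.append((t, sets_by_day[t]))
--         while queue and (t - queue[0][0]) >= window_seconds:
--             queue.popleft()
--         u: set[str] = set()
--         for _, s in queue:
--             u |= s
--         result[t] = len(u)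
--     return result
-- ===== Notes on version B (the rewrite author's own statement) =====
-- stated objective: simpler
-- what changed: Dropped the incrementally maintained multiplicity Counter (with its per-element increment/decrement/delete bookkeeping); B keeps only the deque of window sets and recomputes the distinct count each step as the size of the union of the sets currently in the window.
import Mathlib
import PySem

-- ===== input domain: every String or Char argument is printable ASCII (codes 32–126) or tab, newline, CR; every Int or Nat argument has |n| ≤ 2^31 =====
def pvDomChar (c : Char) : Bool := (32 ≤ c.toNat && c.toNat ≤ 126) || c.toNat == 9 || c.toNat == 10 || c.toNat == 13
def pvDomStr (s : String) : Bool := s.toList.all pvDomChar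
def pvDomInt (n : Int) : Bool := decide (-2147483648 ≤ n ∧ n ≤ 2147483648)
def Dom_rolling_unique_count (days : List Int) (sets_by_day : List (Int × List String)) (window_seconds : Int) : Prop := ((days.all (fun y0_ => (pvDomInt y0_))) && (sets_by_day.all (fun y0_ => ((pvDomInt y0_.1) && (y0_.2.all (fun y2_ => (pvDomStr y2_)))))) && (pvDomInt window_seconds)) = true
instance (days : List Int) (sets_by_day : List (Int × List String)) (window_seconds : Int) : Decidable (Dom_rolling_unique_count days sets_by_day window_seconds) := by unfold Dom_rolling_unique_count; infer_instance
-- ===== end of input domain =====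

-- B drops A's incrementally maintained Counter and instead recomputes each day's distinct
-- count as the size of the union of the sets currently in the window (objective: simpler).

-- ===== PORT A =====
-- 'counter[elem] -= 1; if counter[elem] == 0: del counter[elem]'
def pvDecrStep (c : PySem.Dict String Int) (e : String) : PySem.Dict String Int :=
  if (c.modify e 0 (fun v => v - 1)).getD e 0 = 0
  then (c.modify e 0 (fun v => v - 1)).erase e
  else c.modify e 0 (fun v => v - 1)

-- 'while queue and (t - queue[0][0]) >= window_seconds: popleft and decrement'
def pvPopLoopA (t w : Int) : List (Int × List String) → PySem.Dict String Int →
    List (Int × List String) × PySem.Dict String Int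
  | [], c => ([], c)
  | (t0, s) :: rest, c =>
    if t - t0 ≥ w then pvPopLoopA t w rest (s.foldl pvDecrStep c)
    else ((t0, s) :: rest, c)

-- the 'for t in days' loop of A, state = (result, queue, counter)
def pvLoopA (sbd : PySem.Dict Int (List String)) (w : Int) :
    List Int → PySem.Dict Int Int → List (Int × List String) → PySem.Dict String Int →
    PySem.Dict Int Int
  | [], result, _, _ => result
  | t :: ds, result, queue, counter =>
    match sbd.get? t with
    | none => result   -- Python raises KeyError here; excluded by Pre_
    | some s =>
      let c1 := s.foldl (fun d x => d.modify x 0 (fun v => v + 1)) counter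
      let p := pvPopLoopA t w (queue ++ [(t, s)]) c1
      pvLoopA sbd w ds (result.insert t (p.2.size : Int)) p.1 p.2

def rolling_unique_count (days : List Int) (sets_by_day : List (Int × List String)) (window_seconds : Int) : List (Int × Int) :=
  (pvLoopA (PySem.Dict.mk sets_by_day) window_seconds days PySem.Dict.empty [] PySem.Dict.empty).items

-- ===== PORT B =====
-- 'while queue and (t - queue[0][0]) >= window_seconds: queue.popleft()'
def pvDropStale (t w : Int) : List (Int × List String) → List (Int × List String)
  | [] => []
  | (t0, s) :: rest => if t - t0 ≥ w then pvDropStale t w rest else (t0, s) :: rest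

-- 'u = set(); for _, s in queue: u |= s'
def pvUnionAll (q : List (Int × List String)) : PySem.Set String :=
  q.foldl (fun u p => PySem.Set.update u p.2) PySem.Set.empty

-- the 'for t in days' loop of B, state = (result, queue); no counter
def pvLoopB (sbd : PySem.Dict Int (List String)) (w : Int) :
    List Int → PySem.Dict Int Int → List (Int × List String) → PySem.Dict Int Int
  | [], result, _ => result
  | t :: ds, result, queue =>
    match sbd.get? t with
    | none => result   -- Python raises KeyError here; excluded by Pre_
    | some s =>
      let q2 := pvDropStale t w (queue ++ [(t, s)])
      pvLoopB sbd w ds (result.insert t (PySem.Set.len (pvUnionAll q2))) q2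

def rolling_unique_count_alt (days : List Int) (sets_by_day : List (Int × List String)) (window_seconds : Int) : List (Int × Int) :=
  (pvLoopB (PySem.Dict.mk sets_by_day) window_seconds days PySem.Dict.empty []).items

-- ===== PRECONDITION & SPEC =====
-- Pre_ excludes exactly the inputs on which the Python A raises KeyError: a day not present among the
-- keys of sets_by_day. (Both ports stop identically at such a day, so the proof itself holds on all of Dom.)
def Pre_rolling_unique_count (days : List Int) (sets_by_day : List (Int × List String)) (window_seconds : Int) : Prop :=
  ∀ t ∈ days, t ∈ sets_by_day.map Prod.fst
instance (days : List Int) (sets_by_day : List (Int × List String)) (window_seconds : Int) : Decidable (Pre_rolling_unique_count days sets_by_day window_seconds) := by unfold Pre_rolling_unique_count; infer_instance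

def pvWitness_rolling_unique_count : List Int × (List (Int × List String)) × Int :=
  ([0, 3, 4], [(0, ["a", "b"]), (3, ["b"]), (4, [])], 4)

def Spec_rolling_unique_count (days : List Int) (sets_by_day : List (Int × List String)) (window_seconds : Int) (out : List (Int × Int)) : Prop := out = rolling_unique_count_alt days sets_by_day window_seconds
instance (days : List Int) (sets_by_day : List (Int × List String)) (window_seconds : Int) (out : List (Int × Int)) : Decidable (Spec_rolling_unique_count days sets_by_day window_seconds out) := by unfold Spec_rolling_unique_count; infer_instance

-- ===== CLAIM (what is proved, stated in full; the proofs are below) =====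
def Claim_equal_rolling_unique_count : Prop := ∀ (days : List Int) (sets_by_day : List (Int × List String)) (window_seconds : Int), Dom_rolling_unique_count days sets_by_day window_seconds → Pre_rolling_unique_count days sets_by_day window_seconds → Spec_rolling_unique_count days sets_by_day window_seconds (rolling_unique_count days sets_by_day window_seconds)

-- ===== LEMMAS AND PROOFS =====

-- total multiplicity of e across the sets in the queue (what A's Counter stores)
def pvMcount (q : List (Int × List String)) (e : String) : Int :=
  (q.map (fun p => (p.2.count e : Int))).sum

lemma pvMcount_nil (e : String) : pvMcount [] e = 0 := rfl

lemma pvMcount_cons (t : Int) (s : List String) (q : List (Int × List String)) (e : String) :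
    pvMcount ((t, s) :: q) e = (s.count e : Int) + pvMcount q e := by
  simp [pvMcount]

lemma pvMcount_append_singleton (q : List (Int × List String)) (t : Int) (s : List String) (e : String) :
    pvMcount (q ++ [(t, s)]) e = pvMcount q e + (s.count e : Int) := by
  simp [pvMcount]

lemma pvMcount_nonneg (q : List (Int × List String)) (e : String) : 0 ≤ pvMcount q e := by
  induction q with
  | nil => simp [pvMcount]
  | cons p q ih => obtain ⟨t, s⟩ := p; rw [pvMcount_cons]; positivity

lemma pvMcount_pos_iff (q : List (Int × List String)) (e : String) :
    0 < pvMcount q e ↔ ∃ p ∈ q, e ∈ p.2 := by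
  induction q with
  | nil => simp [pvMcount]
  | cons p q ih =>
    obtain ⟨tp, sp⟩ := p
    rw [pvMcount_cons]
    have h1 := pvMcount_nonneg q e
    have h2 : (0:Int) ≤ (sp.count e : Int) := by positivity
    constructor
    · intro h
      rcases lt_or_ge 0 (pvMcount q e) with hq | hq
      · obtain ⟨r, hr, he⟩ := ih.mp hq
        exact ⟨r, List.mem_cons_of_mem _ hr, he⟩
      · have : 0 < (sp.count e : Int) := by omega
        have : 0 < sp.count e := by exact_mod_cast this
        exact ⟨(tp, sp), List.mem_cons_self, List.count_pos_iff.mp this⟩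
    · rintro ⟨r, hr, he⟩
      rcases List.mem_cons.mp hr with hh | hr'
      · subst hh
        have hc : 0 < sp.count e := List.count_pos_iff.mpr he
        have hc' : 0 < (sp.count e : Int) := by exact_mod_cast hc
        omega
      · have := ih.mpr ⟨r, hr', he⟩; omega

-- the invariant tying A's counter to the queue
def pvCInv (q : List (Int × List String)) (c : PySem.Dict String Int) : Prop :=
  c.keys.Nodup ∧ (∀ e, c.getD e 0 = pvMcount q e) ∧ (∀ e, e ∈ c.keys ↔ 0 < pvMcount q e)

-- erase facts (PySem ships none for Dict.erase)
lemma pvKeys_erase (d : PySem.Dict String Int) (k : String) :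
    (d.erase k).keys = d.keys.filter (fun x => !(x == k)) := by
  obtain ⟨l⟩ := d
  rw [PySem.Dict.erase.eq_def]
  induction l with
  | nil => rfl
  | cons p rest ih =>
    simp only [PySem.Dict.keys, List.filter_cons, List.map_cons] at ih ⊢
    by_cases h : p.1 = k
    · simp [h, ih]
    · simp [h, ih]

lemma pvGet?_erase (l : List (String × Int)) (k e : String) :
    (PySem.Dict.erase (PySem.Dict.mk l) k).get? e =
      if e = k then none else (PySem.Dict.mk l).get? e := by
  induction l with
  | nil =>
    rw [PySem.Dict.erase.eq_def]
    simp [PySem.Dict.get?]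
  | cons p rest ih =>
    rw [PySem.Dict.erase.eq_def] at ih ⊢
    obtain ⟨k0, v0⟩ := p
    simp only [List.filter_cons]
    by_cases hk0 : k0 = k
    · rw [if_neg (by simp [hk0])]
      rw [ih, PySem.Dict.get?_mk_cons]
      by_cases he : e = k
      · simp [he]
      · rw [if_neg he, if_neg he, if_neg (by simp only [beq_iff_eq]; exact fun h => he (h.symm.trans hk0))]
    · rw [if_pos (by simp [hk0])]
      rw [PySem.Dict.get?_mk_cons]
      by_cases he : k0 = e
      · subst he
        simp [PySem.Dict.get?_mk_cons, hk0]
      · rw [if_neg (by simp [he]), ih]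
        by_cases hek : e = k
        · simp [hek]
        · rw [if_neg hek, if_neg hek, PySem.Dict.get?_mk_cons, if_neg (by simp [he])]

lemma pvGetD_erase_self (d : PySem.Dict String Int) (k : String) :
    (d.erase k).getD k 0 = 0 := by
  obtain ⟨l⟩ := d
  rw [PySem.Dict.getD_eq_get?_getD, pvGet?_erase]
  simp

lemma pvGetD_erase_of_ne (d : PySem.Dict String Int) (k e : String) (h : e ≠ k) :
    (d.erase k).getD e 0 = d.getD e 0 := by
  obtain ⟨l⟩ := d
  rw [PySem.Dict.getD_eq_get?_getD, pvGet?_erase, if_neg h, ← PySem.Dict.getD_eq_get?_getD]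

lemma pvMem_keys_erase (d : PySem.Dict String Int) (k e : String) :
    e ∈ (d.erase k).keys ↔ e ∈ d.keys ∧ e ≠ k := by
  rw [pvKeys_erase, List.mem_filter]
  simp

lemma pvNodup_keys_erase (d : PySem.Dict String Int) (k : String) (h : d.keys.Nodup) :
    (d.erase k).keys.Nodup := by
  rw [pvKeys_erase]; exact h.filter _

lemma pvMem_keys_modify (c : PySem.Dict String Int) (k e : String) (f : Int → Int) :
    e ∈ (c.modify k 0 f).keys ↔ e = k ∨ e ∈ c.keys := by
  rw [← PySem.Dict.contains_iff_mem_keys, PySem.Dict.contains_modify]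
  simp [PySem.Dict.contains_iff_mem_keys]

lemma pvNodup_keys_modify (c : PySem.Dict String Int) (k : String) (f : Int → Int)
    (h : c.keys.Nodup) : (c.modify k 0 f).keys.Nodup := by
  rw [PySem.Dict.keys_modify]; exact PySem.Dict.nodup_keys_insert _ _ _ h

-- the counter after A's increment loop still satisfies the invariant, for the grown queue
lemma pvCInv_incr (q : List (Int × List String)) (c : PySem.Dict String Int) (t : Int)
    (s : List String) (h : pvCInv q c) :
    pvCInv (q ++ [(t, s)]) (s.foldl (fun d x => d.modify x 0 (fun v => v + 1)) c) := by
  obtain ⟨hnd, hval, hmem⟩ := h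
  refine ⟨?_, ?_, ?_⟩
  · rw [PySem.Dict.keys_foldl_modify]
    exact PySem.Set.nodup_update _ _ hnd
  · intro e
    rw [PySem.Dict.getD_foldl_modify_add_one, hval, pvMcount_append_singleton]
  · intro e
    rw [PySem.Dict.keys_foldl_modify, PySem.Set.mem_update, hmem, pvMcount_append_singleton]
    have h1 := pvMcount_nonneg q e
    have h2 : (0:Int) ≤ ((s.count e : Nat) : Int) := by positivity
    constructor
    · rintro (h | h)
      · omega
      · have : 0 < s.count e := List.count_pos_iff.mpr h
        have : (0:Int) < (s.count e : Int) := by exact_mod_cast this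
        omega
    · intro h
      rcases lt_or_ge 0 (pvMcount q e) with hq | hq
      · exact Or.inl hq
      · have : (0:Int) < (s.count e : Int) := by omega
        have : 0 < s.count e := by exact_mod_cast this
        exact Or.inr (List.count_pos_iff.mp this)

-- the counter after A's decrement loop over a popped set s satisfies the invariant for the
-- shrunken queue, provided it held for the queue still containing s's contribution
lemma pvCInv_decr (s : List String) : ∀ (c : PySem.Dict String Int) (q : List (Int × List String)),
    c.keys.Nodup →
    (∀ e, c.getD e 0 = pvMcount q e + (s.count e : Int)) →
    (∀ e, (e ∈ c.keys ↔ 0 < pvMcount q e + (s.count e : Int))) →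
    pvCInv q (s.foldl pvDecrStep c) := by
  induction s with
  | nil =>
    intro c q hnd hv hm
    exact ⟨hnd, fun e => by simpa using hv e, fun e => by simpa using hm e⟩
  | cons e0 s' ih =>
    intro c q hnd hv hm
    simp only [List.foldl_cons]
    have hcount : ∀ e : String, ((e0 :: s').count e : Int) =
        (s'.count e : Int) + (if e0 = e then 1 else 0) := by
      intro e
      rw [List.count_cons]
      by_cases h : e0 = e <;> simp [h]
    set cm := c.modify e0 0 (fun v => v - 1) with hcm
    have hcmval : ∀ e, cm.getD e 0 = pvMcount q e + (s'.count e : Int) := by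
      intro e
      rw [hcm, PySem.Dict.getD_modify]
      by_cases h : e = e0
      · subst h; rw [if_pos rfl, hv e, hcount e, if_pos rfl]; ring
      · rw [if_neg h, hv e, hcount e, if_neg (fun hh => h hh.symm)]; ring
    have hcmmem : ∀ e, e ∈ cm.keys ↔ e = e0 ∨ e ∈ c.keys := fun e => pvMem_keys_modify c e0 e _
    have hcmnd : cm.keys.Nodup := pvNodup_keys_modify c e0 _ hnd
    by_cases h0 : cm.getD e0 0 = 0
    · -- erase branch of pvDecrStep
      have hstep : pvDecrStep c e0 = cm.erase e0 := by
        rw [pvDecrStep, ← hcm, if_pos h0]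
      rw [hstep]
      apply ih
      · exact pvNodup_keys_erase _ _ hcmnd
      · intro e
        by_cases h : e = e0
        · subst h
          rw [pvGetD_erase_self]
          rw [hcmval e] at h0
          omega
        · rw [pvGetD_erase_of_ne _ _ _ h, hcmval]
      · intro e
        rw [pvMem_keys_erase]
        by_cases h : e = e0
        · subst h
          rw [hcmval e] at h0
          simp [h0]
        · rw [hcmmem]
          have hc0 : ((e0 :: s').count e : Int) = (s'.count e : Int) := by
            rw [hcount e, if_neg (fun hh => h hh.symm)]; ring
          constructor
          · rintro ⟨(rfl | he), hne⟩
            · exact absurd rfl hne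
            · have := (hm e).mp he
              rw [hc0] at this
              exact this
          · intro hp
            refine ⟨Or.inr ((hm e).mpr ?_), h⟩
            rw [hc0]
            exact hp
    · -- keep branch
      have hstep : pvDecrStep c e0 = cm := by
        rw [pvDecrStep, ← hcm, if_neg h0]
      rw [hstep]
      apply ih
      · exact hcmnd
      · exact hcmval
      · intro e
        rw [hcmmem]
        by_cases h : e = e0
        · subst h
          have h3 := hcmval e
          have h1 := pvMcount_nonneg q e
          have h2 : (0:Int) ≤ (s'.count e : Int) := by positivity
          constructor
          · intro _; omega
          · intro _; exact Or.inl rfl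
        · have hc0 : ((e0 :: s').count e : Int) = (s'.count e : Int) := by
            rw [hcount e, if_neg (fun hh => h hh.symm)]; ring
          constructor
          · rintro (rfl | he)
            · exact absurd rfl h
            · have := (hm e).mp he
              rw [hc0] at this
              exact this
          · intro hp
            refine Or.inr ((hm e).mpr ?_)
            rw [hc0]
            exact hp

-- A's pop loop: first component is B's pvDropStale, and the invariant carries over
lemma pvPopA (t w : Int) : ∀ (q : List (Int × List String)) (c : PySem.Dict String Int),
    pvCInv q c →
    (pvPopLoopA t w q c).1 = pvDropStale t w q ∧
      pvCInv (pvDropStale t w q) (pvPopLoopA t w q c).2 := by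
  intro q
  induction q with
  | nil => intro c h; exact ⟨rfl, h⟩
  | cons p rest ih =>
    intro c h
    obtain ⟨t0, s⟩ := p
    obtain ⟨hnd, hval, hmem⟩ := h
    by_cases hc : t - t0 ≥ w
    · rw [pvPopLoopA, pvDropStale, if_pos hc, if_pos hc]
      apply ih
      apply pvCInv_decr
      · exact hnd
      · intro e; rw [hval e, pvMcount_cons]; ring
      · intro e; rw [hmem e, pvMcount_cons]
        constructor <;> (intro hh; omega)
    · rw [pvPopLoopA, pvDropStale, if_neg hc, if_neg hc]
      exact ⟨rfl, hnd, hval, hmem⟩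

lemma pvUnion_mem : ∀ (q : List (Int × List String)) (u : PySem.Set String) (e : String),
    (e ∈ q.foldl (fun u p => PySem.Set.update u p.2) u ↔ e ∈ u ∨ ∃ p ∈ q, e ∈ p.2) := by
  intro q
  induction q with
  | nil => intro u e; simp
  | cons p rest ih =>
    intro u e
    rw [List.foldl_cons, ih, PySem.Set.mem_update]
    constructor
    · rintro ((h | h) | ⟨r, hr, he⟩)
      · exact Or.inl h
      · exact Or.inr ⟨p, List.mem_cons_self, h⟩
      · exact Or.inr ⟨r, List.mem_cons_of_mem _ hr, he⟩
    · rintro (h | ⟨r, hr, he⟩)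
      · exact Or.inl (Or.inl h)
      · rcases List.mem_cons.mp hr with rfl | hr
        · exact Or.inl (Or.inr he)
        · exact Or.inr ⟨r, hr, he⟩

lemma pvUnion_nodup : ∀ (q : List (Int × List String)) (u : PySem.Set String), u.Nodup →
    (q.foldl (fun u p => PySem.Set.update u p.2) u).Nodup := by
  intro q
  induction q with
  | nil => intro u h; exact h
  | cons p rest ih =>
    intro u h
    exact ih _ (PySem.Set.nodup_update _ _ h)

-- the counter's size IS the size of the union of the window's sets
lemma pvSize_eq (q : List (Int × List String)) (c : PySem.Dict String Int) (h : pvCInv q c) :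
    (c.size : Int) = PySem.Set.len (pvUnionAll q) := by
  obtain ⟨hnd, _, hmem⟩ := h
  have hund : (pvUnionAll q).Nodup := pvUnion_nodup q PySem.Set.empty (by simp [PySem.Set.empty])
  have hperm : c.keys.Perm (pvUnionAll q) := by
    rw [List.perm_ext_iff_of_nodup hnd hund]
    intro e
    rw [hmem e, pvMcount_pos_iff, pvUnionAll, pvUnion_mem]
    simp [PySem.Set.empty]
  have hlen : c.keys.length = (pvUnionAll q).length := hperm.length_eq
  have hsize : c.size = c.keys.length := by
    simp [PySem.Dict.size, PySem.Dict.keys]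
  rw [PySem.Set.len.eq_def, hsize, hlen]

-- the two day-loops agree from any state satisfying the invariant
lemma pvLoop_eq (sbd : PySem.Dict Int (List String)) (w : Int) :
    ∀ (ds : List Int) (result : PySem.Dict Int Int) (q : List (Int × List String))
      (c : PySem.Dict String Int), pvCInv q c →
      pvLoopA sbd w ds result q c = pvLoopB sbd w ds result q := by
  intro ds
  induction ds with
  | nil => intro result q c _; rfl
  | cons t ds ih =>
    intro result q c h
    rw [pvLoopA, pvLoopB]
    cases hg : sbd.get? t with
    | none => rfl
    | some s =>
      dsimp only
      have hinc := pvCInv_incr q c t s h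
      have hp := pvPopA t w (q ++ [(t, s)]) _ hinc
      have h1 := hp.1
      have h2 := hp.2
      rw [pvSize_eq _ _ h2, h1]
      exact ih _ _ _ h2

lemma pvCInv_init : pvCInv [] PySem.Dict.empty := by
  refine ⟨by simp [PySem.Dict.keys_empty], fun e => by
    rw [PySem.Dict.getD_empty, pvMcount_nil], fun e => by
    rw [PySem.Dict.keys_empty, pvMcount_nil]; simp⟩

-- ===== VERDICT (by name: the statement is the Claim_ definition above) =====
theorem rolling_unique_count_spec : Claim_equal_rolling_unique_count := by
  intro days sets_by_day window_seconds _ _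
  unfold Spec_rolling_unique_count rolling_unique_count rolling_unique_count_alt
  rw [pvLoop_eq _ _ days PySem.Dict.empty [] PySem.Dict.empty pvCInv_init]
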